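-- pv_equiv track=rewrite | github.com/kalefranz/algos | leetcode/lc/numbered/1182.py | shortestDistanceColor_algo
-- ===== SOURCE A (Python) =====
-- from typing import List
--
-- def find_nearest(nums, val):
--     # ex: [4, 7, 8], 1
--     lnums = len(nums)
--     if lnums == 0:
--         return -1
--     if lnums == 1:
--         return nums[0]
--
--     i, j = 0, lnums - 1
--     if nums[i] >= val:
--         return nums[i]
--     if nums[j] <= val:
--         return nums[j]
--
--     while j - i > 1:
--         mid = (j - i) // 2 + i
--         if nums[mid] == val:
--             return nums[mid]
--         elif val > nums[mid]:
--             i = mid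
--         else:
--             j = mid
--
--     if val - nums[i] < nums[j] - val:
--         return nums[i]
--     else:
--         return nums[j]
--
-- def shortestDistanceColor_algo(colors: List[int], queries: List[List[int]]):
--     color_map = {}
--     for q, color in enumerate(colors):
--         color_map.setdefault(color, []).append(q)
--
--     results = []
--     for idx, color in queries:
--         positions = color_map.get(color, ())
--         n = find_nearest(positions, idx)
--         steps = abs(n - idx) if n >= 0 else n
--         results.append(steps)
--
--     return results
-- ===== SOURCE B (Python) =====
-- def shortestDistanceColor_algo(colors, queries):
--     # For each query, a single linear scan over colors keeps the smallest
--     # |i - idx| among positions of the matching color (no index map, no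
--     # binary search).
--     results = []
--     for idx, color in queries:
--         best = -1
--         for i, c in enumerate(colors):
--             if c == color:
--                 d = abs(i - idx)
--                 if best < 0 or d < best:
--                     best = d
--         results.append(best)
--     return results
-- ===== Notes on version B (the rewrite author's own statement) =====
-- stated objective: simpler
-- what changed: Drops A's position-index dictionary and per-query binary search (find_nearest); B answers each query with one direct linear scan over colors keeping the minimum |i-idx| among matching positions.
import Mathlib
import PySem

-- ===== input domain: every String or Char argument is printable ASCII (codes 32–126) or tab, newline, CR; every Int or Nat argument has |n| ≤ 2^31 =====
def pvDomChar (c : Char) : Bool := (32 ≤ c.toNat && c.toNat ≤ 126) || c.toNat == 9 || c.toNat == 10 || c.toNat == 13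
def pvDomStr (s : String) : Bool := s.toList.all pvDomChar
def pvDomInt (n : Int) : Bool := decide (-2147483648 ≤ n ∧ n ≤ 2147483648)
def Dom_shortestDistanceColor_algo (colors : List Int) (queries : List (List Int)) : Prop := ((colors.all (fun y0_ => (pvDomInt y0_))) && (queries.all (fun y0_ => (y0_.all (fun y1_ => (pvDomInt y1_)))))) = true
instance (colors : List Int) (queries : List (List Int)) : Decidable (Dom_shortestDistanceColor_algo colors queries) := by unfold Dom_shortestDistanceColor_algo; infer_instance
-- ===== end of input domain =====

-- B replaces A's position-index dict + per-query binary search with a plain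
-- linear scan per query keeping the minimum |i - idx| (simpler, not faster).


-- ===== PORT A =====
-- while loop of find_nearest: state (i, j); terminates because j - i shrinks
def findNearestLoop (nums : List Int) (val : Int) (i j : Nat) : Int :=
  if _h : j - i > 1 then
    let mid := (j - i) / 2 + i
    let m := nums.getD mid 0
    if m = val then m
    else if val > m then findNearestLoop nums val mid j
    else findNearestLoop nums val i mid
  else
    if val - nums.getD i 0 < nums.getD j 0 - val then nums.getD i 0 else nums.getD j 0
termination_by j - i
decreasing_by all_goals omega

def findNearest (nums : List Int) (val : Int) : Int :=
  let lnums := nums.length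
  if lnums = 0 then -1
  else if lnums = 1 then nums.getD 0 0
  else
    let i := 0
    let j := lnums - 1
    if nums.getD i 0 ≥ val then nums.getD i 0
    else if nums.getD j 0 ≤ val then nums.getD j 0
    else findNearestLoop nums val i j

def shortestDistanceColor_algo (colors : List Int) (queries : List (List Int)) : List Int :=
  let colorMap := (PySem.List.enumerate colors).foldl
    (fun d p => d.insert p.2 (d.getD p.2 [] ++ [p.1])) (PySem.Dict.empty)
  queries.foldl (fun results q =>
    let idx := q.getD 0 0
    let color := q.getD 1 0
    let positions := colorMap.getD color []
    let n := findNearest positions idx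
    let steps := if n ≥ 0 then |n - idx| else n
    results ++ [steps]) []

-- ===== PORT B =====
def shortestDistanceColor_algo_alt (colors : List Int) (queries : List (List Int)) : List Int :=
  queries.foldl (fun results q =>
    let idx := q.getD 0 0
    let color := q.getD 1 0
    let best := (PySem.List.enumerate colors).foldl (fun best p =>
      if p.2 = color then
        let d := |p.1 - idx|
        if best < 0 ∨ d < best then d else best
      else best) (-1)
    results ++ [best]) []

-- ===== PRECONDITION & SPEC =====
-- Pre_ excludes query rows whose length is not 2: Python A raises ValueError
-- while unpacking `for idx, color in queries` there.
def Pre_shortestDistanceColor_algo (colors : List Int) (queries : List (List Int)) : Prop :=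
  ∀ q ∈ queries, q.length = 2
instance (colors : List Int) (queries : List (List Int)) : Decidable (Pre_shortestDistanceColor_algo colors queries) := by unfold Pre_shortestDistanceColor_algo; infer_instance
def pvWitness_shortestDistanceColor_algo : List Int × List (List Int) := ([1, 2, 1], [[0, 2], [5, 1], [1, 3]])

def Spec_shortestDistanceColor_algo (colors : List Int) (queries : List (List Int)) (out : List Int) : Prop := out = shortestDistanceColor_algo_alt colors queries
instance (colors : List Int) (queries : List (List Int)) (out : List Int) : Decidable (Spec_shortestDistanceColor_algo colors queries out) := by unfold Spec_shortestDistanceColor_algo; infer_instance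

-- ===== CLAIM (what is proved, stated in full; the proofs are below) =====
def Claim_equal_shortestDistanceColor_algo : Prop := ∀ (colors : List Int) (queries : List (List Int)), Dom_shortestDistanceColor_algo colors queries → Pre_shortestDistanceColor_algo colors queries → Spec_shortestDistanceColor_algo colors queries (shortestDistanceColor_algo colors queries)

-- ===== LEMMAS AND PROOFS =====

-- the positions list A's dict stores for a color: indices of matching entries, in order
def posOf (colors : List Int) (color : Int) : List Int :=
  ((PySem.List.enumerate colors).filter (fun p => p.2 = color)).map (·.1)

theorem colorMap_getD (l : List (Int × Int)) (d : PySem.Dict Int (List Int)) (c : Int) :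
    ((l.foldl (fun d p => d.insert p.2 (d.getD p.2 [] ++ [p.1])) d).getD c []) =
      d.getD c [] ++ (l.filter (fun p => p.2 = c)).map (·.1) := by
  induction l generalizing d with
  | nil => simp
  | cons p rest ih =>
    simp only [List.foldl_cons, List.filter_cons]
    rw [ih]
    by_cases h : p.2 = c
    · simp [h]
    · simp [h, PySem.Dict.getD_insert, Ne.symm h]

theorem posOf_pairwise (colors : List Int) (color : Int) :
    (posOf colors color).Pairwise (· < ·) := by
  unfold posOf
  refine List.Pairwise.map _ (fun a b h => h) ?_
  exact (PySem.List.pairwise_lt_enumerate colors 0).filter _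

theorem posOf_nonneg (colors : List Int) (color : Int) :
    ∀ p ∈ posOf colors color, 0 ≤ p := by
  intro p hp
  unfold posOf at hp
  obtain ⟨q, hq, rfl⟩ := List.mem_map.1 hp
  obtain ⟨k, hk, rfl⟩ := (PySem.List.mem_enumerate_iff colors 0 q).1 (List.mem_of_mem_filter hq)
  simp

-- the binary-search loop returns an element of nums[i..j] at minimal distance to val
theorem findNearestLoop_spec (nums : List Int) (val : Int)
    (hs : ∀ a b : Nat, a ≤ b → b < nums.length → nums.getD a 0 ≤ nums.getD b 0) :
    ∀ n i j : Nat, j - i = n → i < j → j < nums.length → nums.getD i 0 < val → val < nums.getD j 0 →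
      (∃ k, i ≤ k ∧ k ≤ j ∧ findNearestLoop nums val i j = nums.getD k 0) ∧
      (∀ k, i ≤ k → k ≤ j → |findNearestLoop nums val i j - val| ≤ |nums.getD k 0 - val|) := by
  intro n
  induction n using Nat.strong_induction_on with
  | _ n ih =>
    intro i j hn hij hjlen hlo hhi
    rw [findNearestLoop]
    by_cases hbig : j - i > 1
    · simp only [dif_pos hbig]
      set mid := (j - i) / 2 + i with hmid
      have hmid1 : i < mid := by omega
      have hmid2 : mid < j := by omega
      by_cases heq : nums.getD mid 0 = val
      · simp only [if_pos heq]
        constructor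
        · exact ⟨mid, by omega, by omega, rfl⟩
        · intro k hk1 hk2
          rw [heq]
          simp
      · simp only [if_neg heq]
        by_cases hgt : val > nums.getD mid 0
        · simp only [if_pos hgt]
          obtain ⟨⟨k0, hk01, hk02, hk0e⟩, hle⟩ :=
            ih (j - mid) (by omega) mid j rfl (by omega) hjlen hgt hhi
          refine ⟨⟨k0, by omega, hk02, hk0e⟩, ?_⟩
          intro k hk1 hk2
          by_cases hksplit : mid ≤ k
          · exact hle k hksplit hk2
          · have h1 := hle mid le_rfl (by omega)
            have h2 : nums.getD k 0 ≤ nums.getD mid 0 := hs k mid (by omega) (by omega)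
            have e1 : |nums.getD mid 0 - val| = val - nums.getD mid 0 := by
              rw [abs_of_nonpos (by omega)]; ring
            have e2 : |nums.getD k 0 - val| = val - nums.getD k 0 := by
              rw [abs_of_nonpos (by omega)]; ring
            omega
        · simp only [if_neg hgt]
          have hlt : val < nums.getD mid 0 := by
            rcases lt_or_eq_of_le (not_lt.1 hgt) with h | h
            · exact h
            · exact absurd h.symm heq
          obtain ⟨⟨k0, hk01, hk02, hk0e⟩, hle⟩ :=
            ih (mid - i) (by omega) i mid rfl (by omega) (by omega) hlo hlt
          refine ⟨⟨k0, hk01, by omega, hk0e⟩, ?_⟩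
          intro k hk1 hk2
          by_cases hksplit : k ≤ mid
          · exact hle k hk1 hksplit
          · have h1 := hle mid (by omega) le_rfl
            have h2 : nums.getD mid 0 ≤ nums.getD k 0 := hs mid k (by omega) (by omega)
            have e1 : |nums.getD mid 0 - val| = nums.getD mid 0 - val := abs_of_nonneg (by omega)
            have e2 : |nums.getD k 0 - val| = nums.getD k 0 - val := abs_of_nonneg (by omega)
            omega
    · simp only [dif_neg hbig]
      have hj : j = i + 1 := by omega
      have e1 : |nums.getD i 0 - val| = val - nums.getD i 0 := by
        rw [abs_of_nonpos (by omega)]; ring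
      have e2 : |nums.getD j 0 - val| = nums.getD j 0 - val := abs_of_nonneg (by omega)
      by_cases hbr : val - nums.getD i 0 < nums.getD j 0 - val
      · simp only [if_pos hbr]
        refine ⟨⟨i, le_rfl, by omega, rfl⟩, ?_⟩
        intro k hk1 hk2
        have : k = i ∨ k = j := by omega
        rcases this with rfl | rfl <;> omega
      · simp only [if_neg hbr]
        refine ⟨⟨j, by omega, le_rfl, rfl⟩, ?_⟩
        intro k hk1 hk2
        have : k = i ∨ k = j := by omega
        rcases this with rfl | rfl <;> omega

theorem getD_mem (nums : List Int) (k : Nat) (hk : k < nums.length) : nums.getD k 0 ∈ nums := by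
  rw [List.getD_eq_getElem _ _ hk]
  exact List.getElem_mem hk

theorem mem_getD (nums : List Int) (p : Int) (hp : p ∈ nums) :
    ∃ k : Nat, k < nums.length ∧ p = nums.getD k 0 := by
  obtain ⟨k, hk, rfl⟩ := List.mem_iff_getElem.1 hp
  exact ⟨k, hk, (List.getD_eq_getElem _ _ hk).symm⟩

-- find_nearest on a sorted nonempty list returns a member at minimal distance
theorem findNearest_spec (nums : List Int) (val : Int) (hne : nums ≠ [])
    (hs : ∀ a b : Nat, a ≤ b → b < nums.length → nums.getD a 0 ≤ nums.getD b 0) :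
    findNearest nums val ∈ nums ∧ ∀ p ∈ nums, |findNearest nums val - val| ≤ |p - val| := by
  have hlen : 0 < nums.length := List.length_pos_iff.2 hne
  unfold findNearest
  simp only []
  by_cases h0 : nums.length = 0
  · omega
  · simp only [if_neg h0]
    by_cases h1 : nums.length = 1
    · simp only [if_pos h1]
      refine ⟨getD_mem nums 0 hlen, ?_⟩
      intro p hp
      obtain ⟨k, hk, rfl⟩ := mem_getD nums p hp
      have : k = 0 := by omega
      subst this; exact le_rfl
    · simp only [if_neg h1]
      have hjlen : nums.length - 1 < nums.length := by omega
      by_cases hlo : nums.getD 0 0 ≥ val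
      · simp only [if_pos hlo]
        refine ⟨getD_mem nums 0 hlen, ?_⟩
        intro p hp
        obtain ⟨k, hk, rfl⟩ := mem_getD nums p hp
        have h2 : nums.getD 0 0 ≤ nums.getD k 0 := hs 0 k (by omega) hk
        have e1 : |nums.getD 0 0 - val| = nums.getD 0 0 - val := abs_of_nonneg (by omega)
        have e2 : |nums.getD k 0 - val| = nums.getD k 0 - val := abs_of_nonneg (by omega)
        omega
      · simp only [if_neg hlo]
        by_cases hhi : nums.getD (nums.length - 1) 0 ≤ val
        · simp only [if_pos hhi]
          refine ⟨getD_mem nums _ hjlen, ?_⟩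
          intro p hp
          obtain ⟨k, hk, rfl⟩ := mem_getD nums p hp
          have h2 : nums.getD k 0 ≤ nums.getD (nums.length - 1) 0 := hs k _ (by omega) hjlen
          have e1 : |nums.getD (nums.length - 1) 0 - val| = val - nums.getD (nums.length - 1) 0 := by
            rw [abs_of_nonpos (by omega)]; ring
          have e2 : |nums.getD k 0 - val| = val - nums.getD k 0 := by
            rw [abs_of_nonpos (by omega)]; ring
          omega
        · simp only [if_neg hhi]
          obtain ⟨⟨k0, _, _, hk0e⟩, hle⟩ :=
            findNearestLoop_spec nums val hs (nums.length - 1 - 0) 0 (nums.length - 1) rfl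
              (by omega) hjlen (by omega) (by omega)
          refine ⟨by rw [hk0e]; exact getD_mem nums k0 (by omega), ?_⟩
          intro p hp
          obtain ⟨k, hk, rfl⟩ := mem_getD nums p hp
          exact hle k (by omega) (by omega)

-- B's accumulator fold from a nonnegative start is a running minimum
theorem minFold_pos (ds : List Int) : ∀ b : Int, 0 ≤ b → (∀ d ∈ ds, 0 ≤ d) →
    (ds.foldl (fun x d => if x < 0 ∨ d < x then d else x) b = b ∨
     ds.foldl (fun x d => if x < 0 ∨ d < x then d else x) b ∈ ds) ∧
    ds.foldl (fun x d => if x < 0 ∨ d < x then d else x) b ≤ b ∧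
    ∀ d ∈ ds, ds.foldl (fun x d => if x < 0 ∨ d < x then d else x) b ≤ d := by
  induction ds with
  | nil => intro b hb _; exact ⟨Or.inl rfl, le_rfl, by simp⟩
  | cons d rest ih =>
    intro b hb hnn
    have hd : 0 ≤ d := hnn d (by simp)
    simp only [List.foldl_cons]
    have hstep : (if b < 0 ∨ d < b then d else b) = if d < b then d else b := by
      rw [if_congr (or_iff_right (by omega)) rfl rfl]
    rw [hstep]
    have hb' : 0 ≤ (if d < b then d else b) := by split <;> omega
    obtain ⟨h1, h2, h3⟩ := ih (if d < b then d else b) hb' (fun x hx => hnn x (by simp [hx]))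
    refine ⟨?_, ?_, ?_⟩
    · rcases h1 with h | h
      · rw [h]; split
        · right; simp
        · left; rfl
      · right; simp [h]
    · refine le_trans h2 ?_; split <;> omega
    · intro x hx
      rcases List.mem_cons.1 hx with rfl | hx'
      · refine le_trans h2 ?_; split <;> omega
      · exact h3 x hx'

-- started from -1, on a nonempty list of nonnegatives it yields the minimum
theorem minFold_neg1 (ds : List Int) (hnn : ∀ d ∈ ds, 0 ≤ d) (hne : ds ≠ []) :
    ds.foldl (fun x d => if x < 0 ∨ d < x then d else x) (-1) ∈ ds ∧
    ∀ d ∈ ds, ds.foldl (fun x d => if x < 0 ∨ d < x then d else x) (-1) ≤ d := by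
  obtain ⟨d, rest, rfl⟩ := List.exists_cons_of_ne_nil hne
  have hd : 0 ≤ d := hnn d (by simp)
  simp only [List.foldl_cons]
  have hstep : (if (-1 : Int) < 0 ∨ d < -1 then d else -1) = d := by
    rw [if_pos (Or.inl (by omega))]
  rw [hstep]
  obtain ⟨h1, h2, h3⟩ := minFold_pos rest d hd (fun x hx => hnn x (by simp [hx]))
  refine ⟨?_, ?_⟩
  · rcases h1 with h | h
    · simp [h]
    · simp [h]
  · intro x hx
    rcases List.mem_cons.1 hx with rfl | hx'
    · exact h2
    · exact h3 x hx'

-- B's inner scan over enumerate = the running-minimum fold over the distances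
-- of this color's positions
theorem bfold_eq (colors : List Int) (color idx b : Int) :
    ((PySem.List.enumerate colors).foldl (fun best p =>
      if p.2 = color then
        let d := |p.1 - idx|
        if best < 0 ∨ d < best then d else best
      else best) b) =
    ((posOf colors color).map (fun p => |p - idx|)).foldl
      (fun x d => if x < 0 ∨ d < x then d else x) b := by
  unfold posOf
  rw [List.map_map, List.foldl_map, List.foldl_filter]
  have hfun : (fun (x : Int) (y : Int × Int) =>
      if decide (y.2 = color) = true then
        if x < 0 ∨ ((fun p => |p - idx|) ∘ fun x => x.1) y < x
        then ((fun p => |p - idx|) ∘ fun x => x.1) y else x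
      else x) =
      (fun (best : Int) (p : Int × Int) =>
        if p.2 = color then
          let d := |p.1 - idx|
          if best < 0 ∨ d < best then d else best
        else best) := by
    funext x y
    by_cases h : y.2 = color <;> simp [h]
  rw [hfun]

theorem pairwise_getD_mono (l : List Int) (h : l.Pairwise (· < ·)) :
    ∀ a b : Nat, a ≤ b → b < l.length → l.getD a 0 ≤ l.getD b 0 := by
  intro a b hab hb
  rcases eq_or_lt_of_le hab with rfl | hlt
  · exact le_rfl
  · rw [List.getD_eq_getElem _ _ (by omega), List.getD_eq_getElem _ _ hb]
    exact le_of_lt (List.pairwise_iff_getElem.1 h a b (by omega) hb hlt)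

-- the two per-query answers agree
theorem perQuery (colors : List Int) (idx color : Int) :
    (let n := findNearest (posOf colors color) idx
     if n ≥ 0 then |n - idx| else n) =
    ((PySem.List.enumerate colors).foldl (fun best p =>
      if p.2 = color then
        let d := |p.1 - idx|
        if best < 0 ∨ d < best then d else best
      else best) (-1)) := by
  rw [bfold_eq colors color idx (-1)]
  by_cases hP : posOf colors color = []
  · rw [hP]
    simp [findNearest]
  · set P := posOf colors color with hPdef
    have hD : ∀ d ∈ P.map (fun p => |p - idx|), 0 ≤ d := by
      intro d hd
      obtain ⟨p, _, rfl⟩ := List.mem_map.1 hd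
      exact abs_nonneg _
    have hsort := pairwise_getD_mono P (posOf_pairwise colors color)
    obtain ⟨hmem, hleast⟩ := findNearest_spec P idx hP hsort
    have hn0 : 0 ≤ findNearest P idx := posOf_nonneg colors color _ hmem
    simp only [if_pos (show findNearest P idx ≥ 0 from hn0)]
    obtain ⟨hm, hl⟩ := minFold_neg1 (P.map (fun p => |p - idx|)) hD (by simpa using hP)
    apply le_antisymm
    · obtain ⟨p, hp, he⟩ := List.mem_map.1 hm
      rw [← he] at *
      exact hleast p hp
    · exact hl _ (List.mem_map.2 ⟨findNearest P idx, hmem, rfl⟩)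

-- both query folds agree from any common accumulator
theorem foldBoth (colors : List Int) :
    ∀ (queries : List (List Int)) (acc : List Int),
    (queries.foldl (fun results q =>
      let idx := q.getD 0 0
      let color := q.getD 1 0
      let positions := ((PySem.List.enumerate colors).foldl
        (fun d p => d.insert p.2 (d.getD p.2 [] ++ [p.1])) (PySem.Dict.empty)).getD color []
      let n := findNearest positions idx
      let steps := if n ≥ 0 then |n - idx| else n
      results ++ [steps]) acc) =
    (queries.foldl (fun results q =>
      let idx := q.getD 0 0
      let color := q.getD 1 0
      let best := (PySem.List.enumerate colors).foldl (fun best p =>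
        if p.2 = color then
          let d := |p.1 - idx|
          if best < 0 ∨ d < best then d else best
        else best) (-1)
      results ++ [best]) acc) := by
  intro queries
  induction queries with
  | nil => intro acc; rfl
  | cons q rest ih =>
    intro acc
    simp only [List.foldl_cons]
    rw [ih]
    congr 2
    have hmap : ((PySem.List.enumerate colors).foldl
        (fun d p => d.insert p.2 (d.getD p.2 [] ++ [p.1])) (PySem.Dict.empty)).getD (q.getD 1 0) []
        = posOf colors (q.getD 1 0) := by
      rw [colorMap_getD]
      simp [posOf]
    rw [hmap]
    exact congrArg (fun z => [z]) (perQuery colors (q.getD 0 0) (q.getD 1 0))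

-- ===== VERDICT (by name: the statement is the Claim_ definition above) =====
theorem shortestDistanceColor_algo_spec : Claim_equal_shortestDistanceColor_algo := by
  intro colors queries _hdom _hpre
  unfold Spec_shortestDistanceColor_algo shortestDistanceColor_algo shortestDistanceColor_algo_alt
  exact foldBoth colors queries []
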